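-- pv_equiv track=rewrite | github.com/Naylepsh/UWr-II | Term I/WdP/Lista 2/zad 2/zad2.py | win_cond_2
-- ===== SOURCE A (Python) =====
-- def win_cond_2(list = []):
--     l_size = len(list)
--     size = 6 # size of a sequence
--     if (l_size >= 6):
--         counter = 0
--         for i in range(size - 1):
--             if list[l_size - size + i + 1] >= list[l_size - size + i]:
--                 counter += 1
--         if counter == size - 1:
--             return True
--     return False
-- ===== SOURCE B (Python) =====
-- def win_cond_2(list = []):
--     l_size = len(list)
--     w = list[l_size - 6:]
--     return l_size >= 6 and w == sorted(w)
-- ===== Notes on version B (the rewrite author's own statement) =====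
-- stated objective: idiomatic
-- what changed: Replaces the indexed adjacent-pair counting loop with slicing the trailing 6-element window and comparing it to its sorted copy.
import Mathlib
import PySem

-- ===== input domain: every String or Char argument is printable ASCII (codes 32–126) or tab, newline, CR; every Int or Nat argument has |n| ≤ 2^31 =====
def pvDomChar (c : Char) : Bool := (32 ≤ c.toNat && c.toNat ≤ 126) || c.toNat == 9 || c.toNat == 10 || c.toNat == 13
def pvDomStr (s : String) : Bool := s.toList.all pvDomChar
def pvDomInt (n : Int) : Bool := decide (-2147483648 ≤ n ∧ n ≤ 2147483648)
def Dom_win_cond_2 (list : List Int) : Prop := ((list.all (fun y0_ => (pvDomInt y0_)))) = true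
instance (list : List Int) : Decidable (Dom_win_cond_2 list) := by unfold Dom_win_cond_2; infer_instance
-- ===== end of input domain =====

-- B replaces A's indexed adjacent-pair counting loop by slicing the trailing 6-element
-- window and comparing it with its sorted copy (idiomatic; same behaviour).

-- ===== PORT A =====
def win_cond_2 (list : List Int) : Bool :=
  let l_size : Int := list.length
  let size : Int := 6
  if l_size ≥ 6 then
    let counter : Int := (PySem.List.pyRange 0 (size - 1) 1).foldl
      (fun counter i =>
        match PySem.List.pyGet? list (l_size - size + i + 1),
              PySem.List.pyGet? list (l_size - size + i) with
        | some x, some y => if x ≥ y then counter + 1 else counter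
        | _, _ => counter)  -- unreachable: indices are in range when l_size ≥ 6
      0
    if counter = size - 1 then true else false
  else false

-- ===== PORT B =====
def win_cond_2_alt (list : List Int) : Bool :=
  let l_size : Int := list.length
  let w := PySem.List.slice list (some (l_size - 6)) none
  decide (l_size ≥ 6) && (w == PySem.List.sorted w (fun x => x) false)

-- ===== PRECONDITION & SPEC =====
def Spec_win_cond_2 (list : List Int) (out : Bool) : Prop := out = win_cond_2_alt list
instance (list : List Int) (out : Bool) : Decidable (Spec_win_cond_2 list out) := by unfold Spec_win_cond_2; infer_instance

-- ===== CLAIM (what is proved, stated in full; the proofs are below) =====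
def Claim_equal_win_cond_2 : Prop := ∀ (list : List Int), Dom_win_cond_2 list → Spec_win_cond_2 list (win_cond_2 list)

-- ===== LEMMAS AND PROOFS =====

-- sorted([a..f]) = [a..f]  iff the five adjacent pairs are ordered
lemma six_sorted_iff (a b c d e f : Int) :
    (PySem.List.sorted [a,b,c,d,e,f] (fun x => x) false = [a,b,c,d,e,f]) ↔
      (a ≤ b ∧ b ≤ c ∧ c ≤ d ∧ d ≤ e ∧ e ≤ f) := by
  constructor
  · intro h
    have hp := PySem.List.sorted_pairwise (xs := [a,b,c,d,e,f]) (key := fun x => x) 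
    rw [h] at hp
    simp [List.pairwise_cons] at hp
    omega
  · intro h
    apply PySem.List.sorted_eq_self_of_pairwise
    simp [List.pairwise_cons]
    omega

lemma main_lemma (list : List Int) : win_cond_2 list = win_cond_2_alt list := by
  by_cases h6 : (list.length : Int) ≥ 6
  · have hn : 6 ≤ list.length := by exact_mod_cast h6
    -- decompose list into prefix p and trailing window of 6 elements
    obtain ⟨p, w, hpw, hwlen⟩ : ∃ p w, list = p ++ w ∧ w.length = 6 :=
      ⟨list.take (list.length - 6), list.drop (list.length - 6),
        (List.take_append_drop _ _).symm, by simp; omega⟩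
    match w, hwlen with
    | [a, b, c, d, e, f], _ =>
      subst hpw
      have hlen : (((p ++ [a,b,c,d,e,f]).length : Int)) = (p.length : Int) + 6 := by
        simp
      unfold win_cond_2 win_cond_2_alt
      simp only [hlen]
      have hslice : PySem.List.slice (p ++ [a,b,c,d,e,f]) (some ((p.length : Int) + 6 - 6)) none
          = [a,b,c,d,e,f] := by
        have : ((p.length : Int) + 6 - 6) = ((p.length : Nat) : Int) := by omega
        rw [this, PySem.List.slice_from_natCast]
        simp
      rw [hslice]
      simp only [show ((6:Int) - 1) = 5 from rfl]
      rw [show PySem.List.pyRange 0 (5 : Int) 1 = [0,1,2,3,4] from by decide]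
      simp only [List.foldl]
      have g : ∀ k : Nat, PySem.List.pyGet? (p ++ [a,b,c,d,e,f]) ((p.length : Int) + k)
          = [a,b,c,d,e,f][k]? := fun k => PySem.List.pyGet?_append_right p [a,b,c,d,e,f] k
      have e0 := g 0; have e1 := g 1; have e2 := g 2
      have e3 := g 3; have e4 := g 4; have e5 := g 5
      push_cast at e0 e1 e2 e3 e4 e5
      rw [show ((p.length:Int) + 6 - 6 + 0 + 1) = (p.length:Int) + 1 from by ring,
          show ((p.length:Int) + 6 - 6 + 0) = (p.length:Int) + 0 from by ring,
          show ((p.length:Int) + 6 - 6 + 1 + 1) = (p.length:Int) + 2 from by ring,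
          show ((p.length:Int) + 6 - 6 + 1) = (p.length:Int) + 1 from by ring,
          show ((p.length:Int) + 6 - 6 + 2 + 1) = (p.length:Int) + 3 from by ring,
          show ((p.length:Int) + 6 - 6 + 2) = (p.length:Int) + 2 from by ring,
          show ((p.length:Int) + 6 - 6 + 3 + 1) = (p.length:Int) + 4 from by ring,
          show ((p.length:Int) + 6 - 6 + 3) = (p.length:Int) + 3 from by ring,
          show ((p.length:Int) + 6 - 6 + 4 + 1) = (p.length:Int) + 5 from by ring,
          show ((p.length:Int) + 6 - 6 + 4) = (p.length:Int) + 4 from by ring,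
          e0, e1, e2, e3, e4, e5]
      simp only [List.getElem?_cons_zero, List.getElem?_cons_succ]
      have hd : (decide ((p.length:Int) + 6 ≥ 6)) = true := by simp
      rw [hd, Bool.true_and]
      by_cases hs : (PySem.List.sorted [a,b,c,d,e,f] (fun x => x) false = [a,b,c,d,e,f])
      · have hb : ([a,b,c,d,e,f] == PySem.List.sorted [a,b,c,d,e,f] (fun x => x) false) = true := by
          rw [beq_iff_eq]; exact hs.symm
        rw [hb]
        have hch := (six_sorted_iff a b c d e f).mp hs
        clear hs hb hd g e0 e1 e2 e3 e4 e5
        split_ifs <;> first | rfl | (exfalso; omega)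
      · have hb : ([a,b,c,d,e,f] == PySem.List.sorted [a,b,c,d,e,f] (fun x => x) false) = false := by
          rw [beq_eq_false_iff_ne]; exact fun hh => hs hh.symm
        rw [hb]
        have hch := (six_sorted_iff a b c d e f).not.mp hs
        clear hs hb hd g e0 e1 e2 e3 e4 e5
        split_ifs <;> first | rfl | (exfalso; omega)
  · unfold win_cond_2 win_cond_2_alt
    simp [h6]

-- ===== VERDICT (by name: the statement is the Claim_ definition above) =====
theorem win_cond_2_spec : Claim_equal_win_cond_2 := by
  intro list _
  unfold Spec_win_cond_2
  exact main_lemma list
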